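-- pv_equiv track=rewrite | github.com/squirrel289/temple | temple-linter/src/temple_linter/services/base_cleaning_policies.py | _normalize_markdown_core
-- ===== SOURCE A (Python) =====
-- def _normalize_markdown_core(
--     text: str,
--     offsets: list[int],
-- ) -> tuple[str, list[int]]:
--     if not text:
--         return text, offsets
--
--     # Collapse contiguous runs of spaces/tabs into one space to reduce
--     # markdownlint whitespace noise while preserving a deterministic anchor.
--     collapsed_chars: list[str] = []
--     collapsed_offsets: list[int] = []
--     index = 0
--     while index < len(text):
--         char = text[index]
--         if char in {" ", "\t"}:
--             run_start = index
--             while index < len(text) and text[index] in {" ", "\t"}: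
--                 index += 1
--             run_length = index - run_start
--             if run_length == 1:
--                 collapsed_chars.append(text[run_start])
--                 collapsed_offsets.append(offsets[run_start])
--             else:
--                 collapsed_chars.append(" ")
--                 collapsed_offsets.append(offsets[run_start])
--             continue
--         collapsed_chars.append(char)
--         collapsed_offsets.append(offsets[index])
--         index += 1
--
--     # Right-trim horizontal whitespace.
--     while collapsed_chars and collapsed_chars[-1] in {" ", "\t"}:
--         collapsed_chars.pop()
--         collapsed_offsets.pop()
--
--     # Normalize ATX header spacing ("##  title" -> "## title").
--     hash_count = 0
--     while (
--         hash_count < len(collapsed_chars)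
--         and hash_count < 6
--         and collapsed_chars[hash_count] == "#"
--     ):
--         hash_count += 1
--     if 1 <= hash_count <= 6:
--         space_start = hash_count
--         space_end = space_start
--         while space_end < len(collapsed_chars) and collapsed_chars[space_end] == " ":
--             space_end += 1
--         if (space_end - space_start) >= 2:
--             del collapsed_chars[space_start + 1 : space_end]
--             del collapsed_offsets[space_start + 1 : space_end]
--
--     return "".join(collapsed_chars), collapsed_offsets
-- ===== SOURCE B (Python) =====
-- def _normalize_markdown_core(
--     text: str,
--     offsets: list[int],
-- ) -> tuple[str, list[int]]:
--     if not text: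
--         return text, offsets
--
--     # Single forward pass: a run-length state variable replaces A's nested
--     # index-scanning loops.  The first char of a whitespace run is emitted
--     # verbatim; when the run turns out to be longer, that emitted char is
--     # patched to a single space (its anchor offset is kept).
--     chars: list[str] = []
--     offs: list[int] = []
--     run_len = 0
--     for i, ch in enumerate(text):
--         if ch in (" ", "\t"):
--             if run_len == 0:
--                 chars.append(ch)
--                 offs.append(offsets[i])
--             elif run_len == 1:
--                 chars[-1] = " "
--             run_len += 1
--         else:
--             chars.append(ch)
--             offs.append(offsets[i])
--             run_len = 0
--
--     # Right-trim horizontal whitespace.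
--     while chars and chars[-1] in (" ", "\t"):
--         chars.pop()
--         offs.pop()
--
--     # Normalize ATX header spacing ("##  title" -> "## title").
--     hash_count = 0
--     while hash_count < len(chars) and hash_count < 6 and chars[hash_count] == "#":
--         hash_count += 1
--     if 1 <= hash_count <= 6:
--         space_start = hash_count
--         space_end = space_start
--         while space_end < len(chars) and chars[space_end] == " ":
--             space_end += 1
--         if (space_end - space_start) >= 2:
--             del chars[space_start + 1:space_end]
--             del offs[space_start + 1:space_end]
--
--     return "".join(chars), offs
-- ===== Notes on version B (the rewrite author's own statement) =====
-- stated objective: simpler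
-- what changed: The whitespace-collapse phase is rewritten as a single forward for-loop over enumerate(text) with a run-length state variable that patches the last emitted char to a space when a run grows past one, replacing A's nested index-scanning while-loops with run_start/run_length arithmetic; the trim and header phases are unchanged.
import Mathlib
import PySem

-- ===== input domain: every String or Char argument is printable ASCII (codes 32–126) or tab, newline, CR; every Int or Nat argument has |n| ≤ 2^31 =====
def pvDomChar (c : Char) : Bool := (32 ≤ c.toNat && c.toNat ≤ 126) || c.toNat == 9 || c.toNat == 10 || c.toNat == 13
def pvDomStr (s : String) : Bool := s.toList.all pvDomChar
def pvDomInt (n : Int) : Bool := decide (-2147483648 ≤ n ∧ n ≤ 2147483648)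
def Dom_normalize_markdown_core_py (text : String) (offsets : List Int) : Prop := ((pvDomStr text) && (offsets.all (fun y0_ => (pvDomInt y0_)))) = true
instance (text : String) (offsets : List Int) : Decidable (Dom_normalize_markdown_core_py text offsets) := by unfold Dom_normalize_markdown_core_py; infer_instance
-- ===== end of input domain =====

-- B replaces A's nested index-scanning collapse loops by a single forward pass
-- with a run-length state variable (objective: simpler); trim and header phases
-- are unchanged (shared helpers below).

-- char in {" ", "\t"}
def pvWs (c : Char) : Bool := c == ' ' || c == '\t'

-- shared phase 2 (both Pythons are literally identical here): right-trim pop loop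
def pvTrimPop (cs : List Char) (os : List Int) : List Char × List Int :=
  match h : cs.getLast? with
  | some c => if pvWs c then pvTrimPop cs.dropLast os.dropLast else (cs, os)
  | none => (cs, os)
termination_by cs.length
decreasing_by
  cases cs with
  | nil => simp at h
  | cons a l => simp [List.length_dropLast]

-- shared phase 3 (identical in both Pythons): ATX header spacing
def pvHashCount : List Char → Nat → Nat
  | [], k => k
  | c :: rest, k => if k < 6 && c == '#' then pvHashCount rest (k + 1) else k

def pvSpaceCount : List Char → Nat
  | [] => 0
  | c :: rest => if c == ' ' then pvSpaceCount rest + 1 else 0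

def pvFixHeader (cs : List Char) (os : List Int) : List Char × List Int :=
  let h := pvHashCount cs 0
  if 1 ≤ h ∧ h ≤ 6 then
    let s := pvSpaceCount (cs.drop h)
    if 2 ≤ s then
      (cs.take (h + 1) ++ cs.drop (h + s), os.take (h + 1) ++ os.drop (h + s))
    else (cs, os)
  else (cs, os)

-- ===== PORT A =====
-- inner while: length of the whitespace run starting here
def pvRunLen : List Char → Nat
  | [] => 0
  | c :: rest => if pvWs c then pvRunLen rest + 1 else 0

-- A's outer while loop over (remaining chars, current index)
def pvCollapseA (offsets : List Int) : List Char → Nat → List Char × List Int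
  | [], _ => ([], [])
  | c :: rest, i =>
    if pvWs c then
      let n := pvRunLen (c :: rest)
      let t := pvCollapseA offsets (rest.drop (n - 1)) (i + n)
      if n = 1 then (c :: t.1, PySem.List.pyGetD offsets (i : Int) 0 :: t.2)
      else (' ' :: t.1, PySem.List.pyGetD offsets (i : Int) 0 :: t.2)
    else
      let t := pvCollapseA offsets rest (i + 1)
      (c :: t.1, PySem.List.pyGetD offsets (i : Int) 0 :: t.2)
termination_by cs _ => cs.length
decreasing_by
  all_goals (simp [List.length_drop]; try omega)

def normalize_markdown_core_py (text : String) (offsets : List Int) : String × List Int :=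
  if text = "" then (text, offsets)
  else
    let p := pvCollapseA offsets text.toList 0
    let q := pvTrimPop p.1 p.2
    let r := pvFixHeader q.1 q.2
    (String.mk r.1, r.2)

-- ===== PORT B =====
-- enumerate(text) starting at i
def pvEnum : Nat → List Char → List (Nat × Char)
  | _, [] => []
  | i, c :: rest => (i, c) :: pvEnum (i + 1) rest

-- B's loop body: state = (chars reversed, offs reversed, run_len)
def pvStepB (offsets : List Int) (st : List Char × List Int × Nat) (p : Nat × Char) :
    List Char × List Int × Nat :=
  if pvWs p.2 then
    if st.2.2 = 0 then
      (p.2 :: st.1, PySem.List.pyGetD offsets (p.1 : Int) 0 :: st.2.1, 1)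
    else if st.2.2 = 1 then
      (' ' :: st.1.tail, st.2.1, st.2.2 + 1)   -- chars[-1] = " "
    else (st.1, st.2.1, st.2.2 + 1)
  else
    (p.2 :: st.1, PySem.List.pyGetD offsets (p.1 : Int) 0 :: st.2.1, 0)

def normalize_markdown_core_py_alt (text : String) (offsets : List Int) : String × List Int :=
  if text = "" then (text, offsets)
  else
    let st := (pvEnum 0 text.toList).foldl (pvStepB offsets) ([], [], 0)
    let q := pvTrimPop st.1.reverse st.2.1.reverse
    let r := pvFixHeader q.1 q.2
    (String.mk r.1, r.2)

-- ===== PRECONDITION & SPEC =====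
-- Pre_ holds exactly where A returns (no IndexError): every index A reads from
-- offsets — each non-whitespace position and the first position of each
-- space/tab run — is within offsets.
def Pre_normalize_markdown_core_py (text : String) (offsets : List Int) : Prop :=
  ∀ i : Nat, i < text.toList.length →
    (pvWs (text.toList.getD i ' ') = false ∨ i = 0 ∨ pvWs (text.toList.getD (i - 1) ' ') = false) →
    i < offsets.length

instance (text : String) (offsets : List Int) : Decidable (Pre_normalize_markdown_core_py text offsets) := by
  unfold Pre_normalize_markdown_core_py; infer_instance

def pvWitness_normalize_markdown_core_py : String × List Int := ("##  a b", [0, 1, 2, 3, 4, 5, 6])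

def Spec_normalize_markdown_core_py (text : String) (offsets : List Int) (out : String × List Int) : Prop := out = normalize_markdown_core_py_alt text offsets
instance (text : String) (offsets : List Int) (out : String × List Int) : Decidable (Spec_normalize_markdown_core_py text offsets out) := by unfold Spec_normalize_markdown_core_py; infer_instance

-- ===== CLAIM (what is proved, stated in full; the proofs are below) =====
def Claim_equal_normalize_markdown_core_py : Prop := ∀ (text : String) (offsets : List Int), Dom_normalize_markdown_core_py text offsets → Pre_normalize_markdown_core_py text offsets → Spec_normalize_markdown_core_py text offsets (normalize_markdown_core_py text offsets)

-- ===== LEMMAS AND PROOFS =====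

theorem pvEnum_append (i : Nat) (xs ys : List Char) :
    pvEnum i (xs ++ ys) = pvEnum i xs ++ pvEnum (i + xs.length) ys := by
  induction xs generalizing i with
  | nil => simp [pvEnum]
  | cons c rest ih => simp [pvEnum, ih, Nat.add_assoc, Nat.add_comm 1 rest.length]

theorem pvRunLen_eq (cs : List Char) : pvRunLen cs = (cs.takeWhile pvWs).length := by
  induction cs with
  | nil => rfl
  | cons c rest ih =>
    by_cases h : pvWs c = true <;> simp [pvRunLen, List.takeWhile, h, ih]

theorem drop_takeWhile_length (cs : List Char) :
    cs.drop ((cs.takeWhile pvWs).length) = cs.dropWhile pvWs := by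
  induction cs with
  | nil => rfl
  | cons c rest ih =>
    by_cases h : pvWs c = true <;> simp [List.takeWhile, List.dropWhile, h, ih]

-- fold over a whitespace run from run_len m ≥ 1: lists unchanged except one patch
theorem pvRun_fold (offsets : List Int) (run : List Char) (hrun : ∀ c ∈ run, pvWs c = true) :
    ∀ (j : Nat) (x : Char) (rc : List Char) (ro : List Int) (m : Nat), 1 ≤ m →
      (pvEnum j run).foldl (pvStepB offsets) (x :: rc, ro, m)
        = ((if run = [] then x else if m = 1 then ' ' else x) :: rc, ro, m + run.length) := by
  induction run with
  | nil => intro j x rc ro m _; simp [pvEnum]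
  | cons c rest ih =>
    intro j x rc ro m hm
    have hc : pvWs c = true := hrun c (by simp)
    have hrest : ∀ d ∈ rest, pvWs d = true := fun d hd => hrun d (by simp [hd])
    by_cases hm1 : m = 1
    · subst hm1
      simp only [pvEnum, List.foldl_cons, pvStepB, hc, if_true]
      norm_num
      rw [ih hrest (j + 1) ' ' rc ro 2 (by omega)]
      by_cases hr : rest = [] <;> simp [hr] <;> omega
    · have hm2 : m ≠ 0 := by omega
      simp only [pvEnum, List.foldl_cons, pvStepB, hc, if_true, hm2, hm1, if_false]
      rw [ih hrest (j + 1) x rc ro (m + 1) (by omega)]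
      by_cases hr : rest = [] <;> simp [hr] <;> omega

-- main invariant: B's fold computes A's collapse output (reversed, prepended)
theorem pvCollapse_fold (offsets : List Int) (cs : List Char) :
    ∀ (i : Nat) (rc : List Char) (ro : List Int) (r : Nat),
      (r = 0 ∨ ∀ c, cs.head? = some c → pvWs c = false) →
      ((pvEnum i cs).foldl (pvStepB offsets) (rc, ro, r)).1
          = (pvCollapseA offsets cs i).1.reverse ++ rc
      ∧ ((pvEnum i cs).foldl (pvStepB offsets) (rc, ro, r)).2.1
          = (pvCollapseA offsets cs i).2.reverse ++ ro := by
  induction hn : cs.length using Nat.strong_induction_on generalizing cs with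
  | _ n ih =>
  intro i rc ro r hr
  match cs, hn with
  | [], hn => simp [pvEnum, pvCollapseA.eq_def]
  | c :: rest, hn =>
    by_cases hc : pvWs c = true
    · -- whitespace run start; r = 0 by hypothesis
      have hr0 : r = 0 := by
        rcases hr with h | h
        · exact h
        · exact absurd (h c rfl) (by simp [hc])
      subst hr0
      -- first step
      have step1 : pvStepB offsets (rc, ro, 0) (i, c)
          = (c :: rc, PySem.List.pyGetD offsets (i : Int) 0 :: ro, 1) := by
        simp [pvStepB, hc]
      set tw := rest.takeWhile pvWs with htw
      set dw := rest.dropWhile pvWs with hdw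
      have hsplit : rest = tw ++ dw := (List.takeWhile_append_dropWhile (p := pvWs) (l := rest)).symm
      have htwws : ∀ d ∈ tw, pvWs d = true := fun d hd => List.mem_takeWhile_imp hd
      have hdwhead : ∀ d, dw.head? = some d → pvWs d = false := by
        intro d hd
        have h2 := List.head?_dropWhile_not (p := pvWs) (l := rest)
        rw [← hdw, hd] at h2
        simpa using h2
      have hlen : dw.length ≤ rest.length := (List.dropWhile_sublist (p := pvWs) (l := rest)).length_le
      have hfold :
          (pvEnum i (c :: rest)).foldl (pvStepB offsets) (rc, ro, 0)
          = (pvEnum (i + 1 + tw.length) dw).foldl (pvStepB offsets)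
              ((if tw = [] then c else ' ') ::rc,
               PySem.List.pyGetD offsets (i : Int) 0 :: ro, 1 + tw.length) := by
        conv_lhs => rw [pvEnum, List.foldl_cons, step1, hsplit, pvEnum_append, List.foldl_append]
        rw [pvRun_fold offsets tw htwws (i + 1) c rc _ 1 (by omega)]
        by_cases hte : tw = [] <;> simp [hte, Nat.add_comm]
      -- A's side
      have hn1 : pvRunLen (c :: rest) = 1 + tw.length := by
        rw [pvRunLen_eq]; simp [List.takeWhile, hc, htw, Nat.add_comm]
      have hA : pvCollapseA offsets (c :: rest) i
          = (let t := pvCollapseA offsets dw (i + (1 + tw.length));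
             ((if tw = [] then c else ' ') :: t.1,
              PySem.List.pyGetD offsets (i : Int) 0 :: t.2)) := by
        rw [pvCollapseA.eq_def]
        simp only [hc, if_true, hn1]
        by_cases hte : tw = []
        · have hrd : rest = dw := by
            conv_lhs => rw [← List.takeWhile_append_dropWhile (p := pvWs) (l := rest)]
            rw [← htw, ← hdw, hte]; simp
          simp [hte, ← hrd]
        · have h1 : 1 + tw.length ≠ 1 := by
            have : tw.length ≠ 0 := by simpa using hte
            omega
          have hd2 : List.drop tw.length rest = dw := by
            rw [htw, hdw]; exact drop_takeWhile_length rest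
          simp [hte, hd2]
      have hdw_lt : dw.length < n := by
        have hn' : rest.length + 1 = n := by simpa using hn
        omega
      have := ih dw.length hdw_lt dw rfl (i + 1 + tw.length)
        ((if tw = [] then c else ' ') :: rc)
        (PySem.List.pyGetD offsets (i : Int) 0 :: ro) (1 + tw.length) (Or.inr hdwhead)
      rw [hfold, hA]
      refine ⟨?_, ?_⟩
      · rw [this.1]; simp [Nat.add_assoc]
      · rw [this.2]; simp [Nat.add_assoc]
    · -- non-whitespace char: one plain step, run_len reset to 0
      have step1 : pvStepB offsets (rc, ro, r) (i, c)
          = (c :: rc, PySem.List.pyGetD offsets (i : Int) 0 :: ro, 0) := by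
        simp [pvStepB, hc]
      have hrest_lt : rest.length < n := by simp at hn; omega
      have := ih rest.length hrest_lt rest rfl (i + 1) (c :: rc)
        (PySem.List.pyGetD offsets (i : Int) 0 :: ro) 0 (Or.inl rfl)
      rw [pvEnum, List.foldl_cons, step1]
      rw [pvCollapseA.eq_def]
      simp only [hc, Bool.false_eq_true, if_false]
      exact ⟨by rw [this.1]; simp, by rw [this.2]; simp⟩

-- ===== VERDICT (by name: the statement is the Claim_ definition above) =====
theorem normalize_markdown_core_py_spec : Claim_equal_normalize_markdown_core_py := by
  intro text offsets _ _
  unfold Spec_normalize_markdown_core_py normalize_markdown_core_py normalize_markdown_core_py_alt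
  by_cases h : text = ""
  · simp [h]
  · simp only [h, if_false]
    have := pvCollapse_fold offsets text.toList 0 [] [] 0 (Or.inl rfl)
    rw [this.1, this.2]
    simp
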